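-- pv_equiv track=rewrite | github.com/zstephens/pacbio-tools | plot_telomere_long_reads.py | get_nearest_transcript
-- ===== SOURCE A (Python) =====
-- def get_nearest_transcript(myChr, pos, bedDat, max_dist=20000):
-- 	if myChr in bedDat:
-- 		# lazy and slow, but it gets the job done!
-- 		closest_dist = 99999999999
-- 		closest_meta = ''
-- 		for n in bedDat[myChr]:
-- 			if pos >= n[0] and pos <= n[1]:
-- 				closest_dist = 0
-- 				closest_meta = [n[2], n[3]]
-- 				break
-- 			my_dist = min([abs(pos-n[0]), abs(pos-n[1])])
-- 			if my_dist < closest_dist: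
-- 				closest_dist = my_dist
-- 				closest_meta = [n[2], n[3]]
-- 		if closest_dist <= max_dist:
-- 			return (closest_dist, closest_meta)
-- 	return None
-- ===== SOURCE B (Python) =====
-- def get_nearest_transcript(myChr, pos, bedDat, max_dist=20000):
-- 	if myChr not in bedDat:
-- 		return None
-- 	intervals = bedDat[myChr]
-- 	# pass 1: first interval containing pos wins with distance 0
-- 	best = None
-- 	for n in intervals:
-- 		if n[0] <= pos <= n[1]:
-- 			best = (0, [n[2], n[3]])
-- 			break
-- 	# pass 2: otherwise keep the first interval at minimal endpoint distance
-- 	if best is None: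
-- 		for n in intervals:
-- 			d = min(abs(pos - n[0]), abs(pos - n[1]))
-- 			if best is None or d < best[0]:
-- 				best = (d, [n[2], n[3]])
-- 	if best is not None and best[0] <= max_dist:
-- 		return best
-- 	return None
-- ===== Notes on version B (the rewrite author's own statement) =====
-- stated objective: simpler
-- what changed: A's single loop maintaining a running (closest_dist, closest_meta) pair with an inline break is replaced by two separate passes - first a containment scan that ends the search at distance 0, then, only if none contains pos, a nearest-endpoint scan keeping the first minimum - with a single final threshold check.
import Mathlib
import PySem

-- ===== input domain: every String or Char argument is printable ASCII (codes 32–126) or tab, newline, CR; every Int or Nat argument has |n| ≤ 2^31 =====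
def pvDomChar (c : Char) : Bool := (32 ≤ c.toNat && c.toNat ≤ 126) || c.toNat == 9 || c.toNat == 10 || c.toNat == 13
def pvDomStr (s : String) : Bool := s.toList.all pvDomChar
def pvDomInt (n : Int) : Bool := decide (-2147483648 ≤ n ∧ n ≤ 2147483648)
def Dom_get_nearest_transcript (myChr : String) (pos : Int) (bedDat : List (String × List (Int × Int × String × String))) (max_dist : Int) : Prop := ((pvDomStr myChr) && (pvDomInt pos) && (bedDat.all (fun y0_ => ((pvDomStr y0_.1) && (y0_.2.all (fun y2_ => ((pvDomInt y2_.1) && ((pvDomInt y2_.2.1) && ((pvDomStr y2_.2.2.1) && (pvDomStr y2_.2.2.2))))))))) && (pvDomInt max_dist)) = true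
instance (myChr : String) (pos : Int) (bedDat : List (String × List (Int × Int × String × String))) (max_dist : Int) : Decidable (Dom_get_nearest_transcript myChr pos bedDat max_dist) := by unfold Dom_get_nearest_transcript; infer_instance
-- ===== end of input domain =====

-- B restructures A's single running-min loop with an embedded break into two separate passes
-- (containment first, then nearest endpoint) with one final threshold check; objective: simpler, same cost.

-- ===== PORT A =====
-- A's loop: running state (closest_dist, closest_meta), break on containment.
-- closest_meta starts as the Python '' ; within Dom it is never returned (the sentinel
-- distance 99999999999 exceeds any |max_dist| ≤ 2^31), so we carry [] as its stand-in.
def pvGoA (pos max_dist : Int) : List (Int × Int × String × String) → Int → List String → Option (Int × List String)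
  | [], cd, cm => if cd ≤ max_dist then some (cd, cm) else none
  | n :: rest, cd, cm =>
      if pos ≥ n.1 ∧ pos ≤ n.2.1 then
        -- break with closest_dist = 0, then the final threshold check
        if (0 : Int) ≤ max_dist then some (0, [n.2.2.1, n.2.2.2]) else none
      else
        let my_dist := min |pos - n.1| |pos - n.2.1|
        if my_dist < cd then pvGoA pos max_dist rest my_dist [n.2.2.1, n.2.2.2]
        else pvGoA pos max_dist rest cd cm

def get_nearest_transcript (myChr : String) (pos : Int) (bedDat : List (String × List (Int × Int × String × String))) (max_dist : Int) : Option (Int × List String) :=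
  match bedDat.lookup myChr with
  | some ivs => pvGoA pos max_dist ivs 99999999999 []
  | none => none

-- ===== PORT B =====
-- pass 1: first interval containing pos
def pvContain (pos : Int) : List (Int × Int × String × String) → Option (Int × List String)
  | [] => none
  | n :: rest =>
      if n.1 ≤ pos ∧ pos ≤ n.2.1 then some (0, [n.2.2.1, n.2.2.2]) else pvContain pos rest

-- pass 2: first interval at minimal endpoint distance (best : Option)
def pvBest (pos : Int) : List (Int × Int × String × String) → Option (Int × List String) → Option (Int × List String)
  | [], best => best
  | n :: rest, best =>
      let d := min |pos - n.1| |pos - n.2.1|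
      match best with
      | none => pvBest pos rest (some (d, [n.2.2.1, n.2.2.2]))
      | some b =>
          if d < b.1 then pvBest pos rest (some (d, [n.2.2.1, n.2.2.2]))
          else pvBest pos rest (some b)

def get_nearest_transcript_alt (myChr : String) (pos : Int) (bedDat : List (String × List (Int × Int × String × String))) (max_dist : Int) : Option (Int × List String) :=
  match bedDat.lookup myChr with
  | none => none
  | some ivs =>
      let best := match pvContain pos ivs with
                  | some h => some h
                  | none => pvBest pos ivs none
      match best with
      | some b => if b.1 ≤ max_dist then some b else none
      | none => none

-- ===== PRECONDITION & SPEC =====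
def Spec_get_nearest_transcript (myChr : String) (pos : Int) (bedDat : List (String × List (Int × Int × String × String))) (max_dist : Int) (out : Option (Int × List String)) : Prop := out = get_nearest_transcript_alt myChr pos bedDat max_dist
instance (myChr : String) (pos : Int) (bedDat : List (String × List (Int × Int × String × String))) (max_dist : Int) (out : Option (Int × List String)) : Decidable (Spec_get_nearest_transcript myChr pos bedDat max_dist out) := by unfold Spec_get_nearest_transcript; infer_instance

-- ===== CLAIM (what is proved, stated in full; the proofs are below) =====
def Claim_equal_get_nearest_transcript : Prop := ∀ (myChr : String) (pos : Int) (bedDat : List (String × List (Int × Int × String × String))) (max_dist : Int), Dom_get_nearest_transcript myChr pos bedDat max_dist → Spec_get_nearest_transcript myChr pos bedDat max_dist (get_nearest_transcript myChr pos bedDat max_dist)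

-- ===== LEMMAS AND PROOFS =====

-- pvBest with a current best b is a running strict min over the rest of the list
theorem pvBest_some (pos : Int) : ∀ (L : List (Int × Int × String × String)) (b : Int × List String),
    pvBest pos L (some b) =
      some (L.foldl (fun acc n =>
        if min |pos - n.1| |pos - n.2.1| < acc.1
        then (min |pos - n.1| |pos - n.2.1|, [n.2.2.1, n.2.2.2]) else acc) b) := by
  intro L
  induction L with
  | nil => intro b; rfl
  | cons n rest ih =>
      intro b
      simp only [pvBest, List.foldl]
      by_cases h : min |pos - n.1| |pos - n.2.1| < b.1
      · simp [h, ih]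
      · simp [h, ih]

-- the core: A's loop equals B's two passes, for any running state (cd, cm)
theorem goA_eq (pos max_dist : Int) : ∀ (L : List (Int × Int × String × String)) (cd : Int) (cm : List String),
    pvGoA pos max_dist L cd cm =
      match pvContain pos L with
      | some h => if h.1 ≤ max_dist then some h else none
      | none =>
          let b := L.foldl (fun acc n =>
            if min |pos - n.1| |pos - n.2.1| < acc.1
            then (min |pos - n.1| |pos - n.2.1|, [n.2.2.1, n.2.2.2]) else acc) (cd, cm)
          if b.1 ≤ max_dist then some b else none := by
  intro L
  induction L with
  | nil => intro cd cm; rfl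
  | cons n rest ih =>
      intro cd cm
      simp only [pvGoA, pvContain, List.foldl]
      by_cases hc : pos ≥ n.1 ∧ pos ≤ n.2.1
      · have hc' : n.1 ≤ pos ∧ pos ≤ n.2.1 := ⟨hc.1, hc.2⟩
        simp [hc]
      · have hc' : ¬ (n.1 ≤ pos ∧ pos ≤ n.2.1) := fun h => hc ⟨h.1, h.2⟩
        by_cases hd : min |pos - n.1| |pos - n.2.1| < cd
        · simp [hc, hd, ih]
        · simp [hc, hd, ih]

-- the looked-up interval list is a member's second component
theorem lookup_mem {α β : Type} [BEq α] [LawfulBEq α] :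
    ∀ (l : List (α × β)) (k : α) (v : β), l.lookup k = some v → ∃ p ∈ l, p.2 = v := by
  intro l
  induction l with
  | nil => intro k v h; simp [List.lookup] at h
  | cons p rest ih =>
      intro k v h
      simp only [List.lookup] at h
      by_cases hk : k == p.1
      · refine ⟨p, List.mem_cons_self, ?_⟩
        simp only [hk] at h
        exact (Option.some_inj.mp h)
      · simp only [hk] at h
        obtain ⟨q, hq, hv⟩ := ih k v h
        exact ⟨q, List.mem_cons_of_mem _ hq, hv⟩

theorem get_nearest_transcript_spec : Claim_equal_get_nearest_transcript := by
  intro myChr pos bedDat max_dist hdom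
  unfold Spec_get_nearest_transcript
  unfold get_nearest_transcript get_nearest_transcript_alt
  cases hlk : bedDat.lookup myChr with
  | none => rfl
  | some ivs =>
      simp only []
      -- Dom bounds: pos, max_dist and all interval endpoints are within ±2^31
      unfold Dom_get_nearest_transcript at hdom
      simp only [Bool.and_eq_true, List.all_eq_true, pvDomInt, decide_eq_true_eq] at hdom
      obtain ⟨⟨⟨-, hpos⟩, hbed⟩, hmax⟩ := hdom
      obtain ⟨p, hp, hv⟩ := lookup_mem bedDat myChr ivs hlk
      have hivs : ∀ n ∈ ivs, min |pos - n.1| |pos - n.2.1| < 99999999999 := by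
        intro n hn
        have := (hbed p hp).2 n (hv ▸ hn)
        obtain ⟨h1, h2, -⟩ := this
        have : |pos - n.1| < 99999999999 := by rw [abs_lt]; omega
        have : |pos - n.2.1| < 99999999999 := by rw [abs_lt]; omega
        omega
      rw [goA_eq]
      cases hct : pvContain pos ivs with
      | some h => rfl
      | none =>
          simp only []
          cases ivs with
          | nil =>
              simp only [List.foldl, pvBest]
              have : ¬ ((99999999999 : Int) ≤ max_dist) := by omega
              simp [this]
          | cons n rest =>
              have hd : min |pos - n.1| |pos - n.2.1| < 99999999999 :=
                hivs n List.mem_cons_self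
              simp only [List.foldl, pvBest, if_pos hd]
              rw [pvBest_some]
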